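-- pv_equiv track=rewrite | github.com/max-f/advent-of-code | 2024/d09.py | find_file_position
-- ===== SOURCE A (Python) =====
-- def find_file_position(disk, file_id):
--     start = -1
--     end = -1
--     for i, val in enumerate(disk):
--         if val == file_id:
--             if start == -1:
--                 start = i
--             end = i
--         elif start != -1:
--             break
--     return start, end
-- ===== SOURCE B (Python) =====
-- def find_file_position(disk, file_id):
--     if file_id not in disk:
--         return -1, -1
--     start = disk.index(file_id)
--     end = start
--     while end + 1 < len(disk) and disk[end + 1] == file_id:
--         end += 1
--     return start, end
-- ===== Notes on version B (the rewrite author's own statement) =====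
-- stated objective: idiomatic
-- what changed: Replaces A's single stateful enumerate pass with start/end/break bookkeeping by a find-then-extend decomposition: membership guard, disk.index to locate the start, and a while loop extending the end over the contiguous run.
import Mathlib
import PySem

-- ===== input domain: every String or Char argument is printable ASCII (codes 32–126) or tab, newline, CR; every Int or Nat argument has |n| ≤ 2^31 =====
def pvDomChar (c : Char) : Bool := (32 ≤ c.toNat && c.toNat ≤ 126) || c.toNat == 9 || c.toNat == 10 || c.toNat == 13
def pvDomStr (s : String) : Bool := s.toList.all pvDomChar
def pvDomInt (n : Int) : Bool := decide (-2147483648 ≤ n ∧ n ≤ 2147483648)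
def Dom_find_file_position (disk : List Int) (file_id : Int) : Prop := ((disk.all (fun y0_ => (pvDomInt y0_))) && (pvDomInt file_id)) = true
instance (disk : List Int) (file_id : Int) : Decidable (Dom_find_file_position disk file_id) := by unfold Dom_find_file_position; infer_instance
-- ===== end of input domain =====

-- B replaces A's single stateful enumerate pass (start/end bookkeeping with a break) by an
-- idiomatic find-then-extend decomposition: membership guard, .index for the start, then a
-- loop extending the end over the contiguous run.  Same O(n) cost, different decomposition.

-- ===== PORT A =====
-- A's for-loop over enumerate(disk) with state (start, end) and a break.
def ffpLoop (l : List Int) (file_id i start endv : Int) : Int × Int :=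
  match l with
  | [] => (start, endv)
  | v :: rest =>
    if v = file_id then
      ffpLoop rest file_id (i + 1) (if start = -1 then i else start) i
    else if start ≠ -1 then (start, endv)
    else ffpLoop rest file_id (i + 1) start endv

def find_file_position (disk : List Int) (file_id : Int) : Int × Int :=
  ffpLoop disk file_id 0 (-1) (-1)

-- ===== PORT B =====
-- B's while loop 'while end+1 < len(disk) and disk[end+1] == file_id: end += 1',
-- ported as the obvious structural recursion over the suffix disk[start+1:].
def ffpExtend (l : List Int) (file_id endv : Int) : Int :=
  match l with
  | [] => endv
  | v :: rest => if v = file_id then ffpExtend rest file_id (endv + 1) else endv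

def find_file_position_alt (disk : List Int) (file_id : Int) : Int × Int :=
  if disk.contains file_id then
    match PySem.List.index? disk file_id with
    | some s => ((s : Int), ffpExtend (disk.drop (s + 1)) file_id (s : Int))
    | none => (-1, -1)   -- unreachable: guarded by the membership test
  else (-1, -1)

-- ===== PRECONDITION & SPEC =====
def Spec_find_file_position (disk : List Int) (file_id : Int) (out : Int × Int) : Prop := out = find_file_position_alt disk file_id
instance (disk : List Int) (file_id : Int) (out : Int × Int) : Decidable (Spec_find_file_position disk file_id out) := by unfold Spec_find_file_position; infer_instance

-- ===== CLAIM (what is proved, stated in full; the proofs are below) =====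
def Claim_equal_find_file_position : Prop := ∀ (disk : List Int) (file_id : Int), Dom_find_file_position disk file_id → Spec_find_file_position disk file_id (find_file_position disk file_id)

-- ===== LEMMAS AND PROOFS =====

-- Once A's loop has locked onto the run (start ≠ -1, index i = endv+1), it behaves as B's extend.
theorem ffpLoop_extend (l : List Int) (fid : Int) : ∀ (s e : Int), s ≠ -1 →
    ffpLoop l fid (e + 1) s e = (s, ffpExtend l fid e) := by
  induction l with
  | nil => intro s e _; simp [ffpLoop, ffpExtend]
  | cons v rest ih =>
    intro s e hs
    by_cases hv : v = fid
    · simp only [ffpLoop, ffpExtend, hv, if_true, if_neg hs]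
      exact ih s (e + 1) hs
    · simp [ffpLoop, ffpExtend, hv, hs]

theorem ffpLoop_main (l : List Int) (fid : Int) : ∀ (i : Int), 0 ≤ i →
    ffpLoop l fid i (-1) (-1) =
      match PySem.List.index? l fid with
      | none => (-1, -1)
      | some j => (i + (j : Int), ffpExtend (l.drop (j + 1)) fid (i + (j : Int))) := by
  induction l with
  | nil => intro i _; simp [ffpLoop, PySem.List.index?]
  | cons v rest ih =>
    intro i hi
    by_cases hv : v = fid
    · subst hv
      rw [PySem.List.index?_cons_self]
      simp only [ffpLoop, if_true]
      have hne : i ≠ -1 := by omega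
      have := ffpLoop_extend rest v i i hne
      simpa using this
    · rw [PySem.List.index?_cons_of_ne rest hv]
      simp only [ffpLoop, if_neg hv]
      rw [ih (i + 1) (by omega)]
      cases h : PySem.List.index? rest fid with
      | none => simp
      | some j =>
        simp only [Option.map_some]
        have h1 : i + 1 + (j : Int) = i + ((j + 1 : Nat) : Int) := by push_cast; ring
        have h2 : (v :: rest).drop (j + 1 + 1) = rest.drop (j + 1) := by simp
        rw [h1, h2]
        simp

theorem find_file_position_eq (disk : List Int) (fid : Int) :
    find_file_position disk fid = find_file_position_alt disk fid := by
  unfold find_file_position find_file_position_alt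
  rw [ffpLoop_main disk fid 0 le_rfl]
  by_cases hm : fid ∈ disk
  · have hmem : disk.contains fid = true := by simpa using hm
    rw [if_pos hmem]
    cases h : PySem.List.index? disk fid with
    | none => exact absurd ((PySem.List.index?_eq_none_iff disk fid).mp h) (not_not_intro hm)
    | some j => simp
  · have hmem : disk.contains fid = false := by simpa using hm
    rw [if_neg (by exact fun hc => hm (by simpa using hc))]
    have h : PySem.List.index? disk fid = none :=
      (PySem.List.index?_eq_none_iff disk fid).mpr hm
    rw [h]

-- ===== VERDICT (by name: the statement is the Claim_ definition above) =====
theorem find_file_position_spec : Claim_equal_find_file_position := by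
  intro disk file_id _
  unfold Spec_find_file_position
  exact find_file_position_eq disk file_id
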